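-- pv_equiv track=rewrite | github.com/farazsrahman/games | src/games/blotto/blotto.py | index_to_allocation
-- ===== SOURCE A (Python) =====
-- from math import comb
--
-- def index_to_allocation(index, N, K):
--     """
--     Inverse of allocation_to_index: map index -> allocation tuple of length K.
--     """
--     M = N + K - 1
--     total = comb(M, K - 1)
--     assert 0 <= index < total
--
--     bars = []
--     prev = 0
--     r = index
--     for i in range(1, K):
--         # choose the smallest feasible bar position at this step
--         for t in range(prev + 1, M - ((K - 1) - i) + 1):
--             cnt = comb(M - t, (K - 1) - i)
--             if r < cnt:
--                 bars.append(t)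
--                 prev = t
--                 break
--             r -= cnt
--
--     # convert bars -> allocation
--     x = [0] * K
--     x[0] = bars[0] - 1
--     for i in range(1, K - 1):
--         x[i] = bars[i] - bars[i - 1] - 1
--     x[K - 1] = M - bars[-1]
--     return tuple(x)
-- ===== SOURCE B (Python) =====
-- from math import comb
--
-- def index_to_allocation(index, N, K):
--     """
--     Inverse of allocation_to_index, in one pass: the running count
--     cnt = comb(M - t, j) is maintained by ratio updates (one comb call total)
--     and allocation entries are emitted directly, without a bars list.
--     """
--     M = N + K - 1
--     total = comb(M, K - 1)
--     assert 0 <= index < total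
--
--     alloc = []
--     r = index
--     prev = 0
--     t = 1
--     j = K - 2
--     cnt = comb(M - 1, K - 2) if K >= 2 else 0
--     while j >= 0:
--         if r < cnt:
--             # bar found at t: emit the entry and rebase cnt for the next, shorter suffix
--             alloc.append(t - prev - 1)
--             if j >= 1:
--                 cnt = cnt * j // (M - t)
--             prev = t
--             j -= 1
--         else:
--             # advance the candidate bar: comb(M-t-1, j) = comb(M-t, j) * (M-t-j) / (M-t)
--             r -= cnt
--             cnt = cnt * (M - t - j) // (M - t)
--         t += 1
--     alloc.append(M - prev)
--     return tuple(alloc)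
-- ===== Notes on version B (the rewrite author's own statement) =====
-- stated objective: faster
-- what changed: B makes a single comb call and then runs one pass that maintains the running count comb(M-t, j) by exact multiplicative ratio updates, emitting each allocation entry directly, where A recomputes comb from scratch for every candidate bar position and builds a bars list that a second pass converts via array assignments.
import Mathlib
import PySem

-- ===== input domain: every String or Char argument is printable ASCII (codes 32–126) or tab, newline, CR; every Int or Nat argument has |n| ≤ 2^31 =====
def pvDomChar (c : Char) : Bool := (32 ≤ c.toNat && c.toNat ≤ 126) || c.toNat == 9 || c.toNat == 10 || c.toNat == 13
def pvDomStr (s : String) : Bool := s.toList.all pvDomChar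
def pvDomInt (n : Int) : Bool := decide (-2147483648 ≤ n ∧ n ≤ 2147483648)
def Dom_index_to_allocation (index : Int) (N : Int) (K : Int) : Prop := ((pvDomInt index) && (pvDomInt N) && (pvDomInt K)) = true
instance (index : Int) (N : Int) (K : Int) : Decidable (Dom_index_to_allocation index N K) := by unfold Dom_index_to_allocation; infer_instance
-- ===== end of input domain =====

-- B runs one pass that maintains the running count comb(M-t, j) by ratio updates
-- (a single comb evaluation in total, where A calls comb for every candidate bar
-- position) and emits allocation entries directly, without a bars list (objective: faster).

-- ===== PORT A =====
-- math.comb n k, exact for 0 ≤ n and 0 ≤ k (Python raises ValueError on negative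
-- arguments; no call reaches negatives inside Pre_); shared by both ports.
def pyComb (n k : Int) : Int :=
  if 0 ≤ n ∧ 0 ≤ k then ((n.toNat.choose k.toNat : Nat) : Int) else 0

-- A's inner `for t in range(prev+1, M-j+1)` with break: first t with r < cnt,
-- threading the decremented r; none = the loop fell through without break.
def scanA (M j : Int) : List Int → Int → Option Int × Int
  | [], r => (none, r)
  | t :: ts, r =>
    let cnt := pyComb (M - t) j
    if r < cnt then (some t, r) else scanA M j ts (r - cnt)

-- one iteration of A's outer loop; state = (bars, prev, r)
def stepA (M K : Int) (st : List Int × Int × Int) (i : Int) : List Int × Int × Int :=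
  let j := (K - 1) - i
  match scanA M j (PySem.List.pyRange (st.2.1 + 1) (M - j + 1) 1) st.2.2 with
  | (some t, r') => (st.1 ++ [t], t, r')
  | (none, r') => (st.1, st.2.1, r')

def index_to_allocation (index : Int) (N : Int) (K : Int) : List Int :=
  let M := N + K - 1
  let st := (PySem.List.pyRange 1 K 1).foldl (stepA M K) ([], 0, index)
  let bars := st.1
  -- x = [0]*K; x[0] = bars[0]-1; for i in range(1,K-1): x[i] = bars[i]-bars[i-1]-1; x[K-1] = M-bars[-1]
  let x0 := PySem.List.pyRepeat [(0 : Int)] K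
  let x1 := PySem.List.pySetD x0 0 (PySem.List.pyGetD bars 0 0 - 1)
  let x2 := (PySem.List.pyRange 1 (K - 1) 1).foldl
    (fun x i => PySem.List.pySetD x i
      (PySem.List.pyGetD bars i 0 - PySem.List.pyGetD bars (i - 1) 0 - 1)) x1
  PySem.List.pySetD x2 (K - 1) (M - PySem.List.pyGetD bars (-1) 0)

-- ===== PORT B =====
-- B's single `while j >= 0` loop; state = (alloc, r, prev, t, j, cnt).  The `t ≤ M`
-- guard only makes the recursion total: where it fails, Python B raises
-- ZeroDivisionError on `// (M - t)` (such inputs are outside Pre_).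
def loopB (M : Int) (alloc : List Int) (r prev t j cnt : Int) : List Int × Int :=
  if 0 ≤ j then
    if _h : t ≤ M then
      if r < cnt then
        loopB M (alloc ++ [t - prev - 1]) r t (t + 1) (j - 1)
          (if 1 ≤ j then PySem.Int.floordiv (cnt * j) (M - t) else cnt)
      else
        loopB M alloc (r - cnt) prev (t + 1) j
          (PySem.Int.floordiv (cnt * (M - t - j)) (M - t))
    else (alloc, prev)
  else (alloc, prev)
termination_by (M + 1 - t).toNat
decreasing_by
  · omega
  · omega

def index_to_allocation_alt (index : Int) (N : Int) (K : Int) : List Int :=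
  let M := N + K - 1
  let cnt0 := if 2 ≤ K then pyComb (M - 1) (K - 2) else 0
  let res := loopB M [] index 0 1 (K - 2) cnt0
  res.1 ++ [M - res.2]

-- ===== PRECONDITION & SPEC =====
-- Pre_ = exactly the inputs where A returns: K ≥ 2 (for K ≤ 1 the assert fails, comb
-- raises, or bars[0] raises IndexError), N ≥ 0, and 0 ≤ index < comb(N+K-1, K-1)
-- (otherwise the assert fails or comb raises).
def Pre_index_to_allocation (index : Int) (N : Int) (K : Int) : Prop :=
  2 ≤ K ∧ 0 ≤ N ∧ 0 ≤ index ∧ index < ((N + K - 1).toNat.choose (K - 1).toNat : Int)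
instance (index : Int) (N : Int) (K : Int) : Decidable (Pre_index_to_allocation index N K) := by
  unfold Pre_index_to_allocation; infer_instance

def pvWitness_index_to_allocation : Int × Int × Int := (3, 3, 3)

def Spec_index_to_allocation (index : Int) (N : Int) (K : Int) (out : List Int) : Prop :=
  out = index_to_allocation_alt index N K
instance (index : Int) (N : Int) (K : Int) (out : List Int) : Decidable (Spec_index_to_allocation index N K out) := by
  unfold Spec_index_to_allocation; infer_instance

-- ===== CLAIM (what is proved, stated in full; the proofs are below) =====
def Claim_equal_index_to_allocation : Prop := ∀ (index : Int) (N : Int) (K : Int), Dom_index_to_allocation index N K → Pre_index_to_allocation index N K → Spec_index_to_allocation index N K (index_to_allocation index N K)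


-- ===== LEMMAS AND PROOFS =====

theorem pyComb_pascal {x j : Int} (hx : 0 ≤ x) (hj : 0 ≤ j) :
    pyComb (x + 1) (j + 1) = pyComb x j + pyComb x (j + 1) := by
  have h1 : (x + 1).toNat = x.toNat + 1 := by omega
  have h2 : (j + 1).toNat = j.toNat + 1 := by omega
  unfold pyComb
  rw [if_pos (by omega), if_pos (by omega), if_pos (by omega), h1, h2,
    Nat.choose_succ_succ]
  push_cast; ring

theorem pyComb_self {x : Int} (hx : 0 ≤ x) : pyComb x x = 1 := by
  unfold pyComb; rw [if_pos (by omega), Nat.choose_self]; simp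

theorem pyComb_pos_le {x j : Int} (hx : 0 ≤ j) (h : 0 < pyComb x (j + 1)) : j + 1 ≤ x := by
  by_contra hc
  unfold pyComb at h
  split at h
  · rename_i hh
    rw [Nat.choose_eq_zero_of_lt (by omega)] at h; simp at h
  · omega

-- the scan specification: result t, the new remainder, minimality, and the invariant

-- exact ratio update for the advance step: comb(m-1, j) = comb(m, j) * (m - j) // m
theorem pyComb_ratio_scan {m j : Int} (hm : 0 < m) (hj : 0 ≤ j) :
    PySem.Int.floordiv (pyComb m j * (m - j)) m = pyComb (m - 1) j := by
  have hid : pyComb m j * (m - j) = m * pyComb (m - 1) j := by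
    unfold pyComb
    rw [if_pos (by omega), if_pos (by omega)]
    by_cases hjm : j ≤ m - 1
    · have e1 := Nat.choose_succ_right_eq m.toNat j.toNat
      have e2 := Nat.succ_mul_choose_eq (m.toNat - 1) j.toNat
      simp only [Nat.succ_eq_add_one] at e2
      have hs : m.toNat - 1 + 1 = m.toNat := by omega
      rw [hs] at e2
      have hm1 : (m - 1).toNat = m.toNat - 1 := by omega
      have hnat : m.toNat.choose j.toNat * (m.toNat - j.toNat)
          = m.toNat * (m.toNat - 1).choose j.toNat := by rw [← e1, e2]
      have hcast := congrArg (fun n : Nat => (n : Int)) hnat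
      simp only [Nat.cast_mul] at hcast
      have hsub : ((m.toNat - j.toNat : Nat) : Int) = m - j := by omega
      have hmm : ((m.toNat : Nat) : Int) = m := by omega
      rw [hsub, hmm] at hcast
      rw [hm1]
      linarith [hcast]
    · have z1 : m.toNat.choose j.toNat * (m - j) = 0 ∨ j = m := by
        by_cases hje : j = m
        · right; exact hje
        · left
          have : m.toNat < j.toNat := by omega
          rw [Nat.choose_eq_zero_of_lt this]; simp
      have z2 : (m - 1).toNat.choose j.toNat = 0 :=
        Nat.choose_eq_zero_of_lt (by omega)
      rcases z1 with h | h
      · rw [h, z2]; simp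
      · subst h; rw [z2]; simp
  rw [hid, PySem.Int.floordiv_eq_ediv_of_pos hm, Int.mul_ediv_cancel_left _ (by omega)]

-- exact ratio update for the break step: comb(m-1, j-1) = comb(m, j) * j // m
theorem pyComb_ratio_break {m j : Int} (hm : 0 < m) (hj : 1 ≤ j) :
    PySem.Int.floordiv (pyComb m j * j) m = pyComb (m - 1) (j - 1) := by
  have hid : pyComb m j * j = m * pyComb (m - 1) (j - 1) := by
    unfold pyComb
    rw [if_pos (by omega), if_pos (by omega)]
    have e2 := Nat.succ_mul_choose_eq (m.toNat - 1) (j.toNat - 1)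
    simp only [Nat.succ_eq_add_one] at e2
    have hs1 : m.toNat - 1 + 1 = m.toNat := by omega
    have hs2 : j.toNat - 1 + 1 = j.toNat := by omega
    rw [hs1, hs2] at e2
    have hm1 : (m - 1).toNat = m.toNat - 1 := by omega
    have hj1 : (j - 1).toNat = j.toNat - 1 := by omega
    have hcast := congrArg (fun n : Nat => (n : Int)) e2
    simp only [Nat.cast_mul] at hcast
    have hmm : ((m.toNat : Nat) : Int) = m := by omega
    have hjj : ((j.toNat : Nat) : Int) = j := by omega
    rw [hmm, hjj] at hcast
    rw [hm1, hj1]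
    linarith [hcast]
  rw [hid, PySem.Int.floordiv_eq_ediv_of_pos hm, Int.mul_ediv_cancel_left _ (by omega)]

-- the coupled inner loop: A's scan over range(t, M-j+1) finds the bar t' with the
-- remainder r', and B's loop advances through exactly the same positions, keeping
-- cnt = comb(M-t, j), until it emits the entry for that same bar
theorem scan_loop (M j : Int) (hj : 0 ≤ j) :
    ∀ n (t r cnt prev : Int) (alloc : List Int), (M - j - t).toNat = n →
    t ≤ M - j → 0 ≤ r → r < pyComb (M - t + 1) (j + 1) → cnt = pyComb (M - t) j →
    ∃ t' r', t ≤ t' ∧ t' ≤ M - j ∧ 0 ≤ r' ∧ r' < pyComb (M - t') j ∧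
      scanA M j (PySem.List.pyRange t (M - j + 1) 1) r = (some t', r') ∧
      loopB M alloc r prev t j cnt
        = loopB M (alloc ++ [t' - prev - 1]) r' t' (t' + 1) (j - 1)
            (if 1 ≤ j then PySem.Int.floordiv (pyComb (M - t') j * j) (M - t')
             else pyComb (M - t') j) := by
  intro n
  induction n with
  | zero =>
    intro t r cnt prev alloc hn ht hr0 hrb hcnt
    subst hcnt
    have hteq : t = M - j := by omega
    have h1 : M - t = j := by omega
    have h2 : M - t + 1 = j + 1 := by omega
    rw [h2, pyComb_self (by omega)] at hrb
    have hbreak : r < pyComb (M - t) j := by rw [h1, pyComb_self hj]; omega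
    refine ⟨t, r, le_refl t, ht, hr0, hbreak, ?_, ?_⟩
    · rw [PySem.List.pyRange_one_cons (by omega)]
      simp only [scanA]
      rw [if_pos hbreak]
    · rw [loopB, if_pos hj, dif_pos (by omega : t ≤ M), if_pos hbreak]
  | succ n ih =>
    intro t r cnt prev alloc hn ht hr0 hrb hcnt
    subst hcnt
    have hpas : pyComb (M - t + 1) (j + 1) = pyComb (M - t) j + pyComb (M - t) (j + 1) :=
      pyComb_pascal (by omega) hj
    by_cases hbreak : r < pyComb (M - t) j
    · refine ⟨t, r, le_refl t, ht, hr0, hbreak, ?_, ?_⟩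
      · rw [PySem.List.pyRange_one_cons (by omega)]
        simp only [scanA]
        rw [if_pos hbreak]
      · rw [loopB, if_pos hj, dif_pos (by omega : t ≤ M), if_pos hbreak]
    · have hlt : t < M - j := by
        by_contra hc
        have h1 : M - t = j := by omega
        have h2 : M - t + 1 = j + 1 := by omega
        rw [h2, pyComb_self (by omega)] at hrb
        rw [h1, pyComb_self hj] at hbreak
        omega
      have hM1 : M - (t + 1) = M - t - 1 := by ring
      have hM2 : M - (t + 1) + 1 = M - t := by ring
      have hcnt' : PySem.Int.floordiv (pyComb (M - t) j * (M - t - j)) (M - t)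
          = pyComb (M - (t + 1)) j := by
        rw [hM1, pyComb_ratio_scan (by omega) hj]
      obtain ⟨t', r', h1, h2, h3, h4, heqS, heqL⟩ :=
        ih (t + 1) (r - pyComb (M - t) j) (pyComb (M - (t + 1)) j) prev alloc (by omega)
          (by omega) (by omega) (by rw [hM2]; omega) rfl
      refine ⟨t', r', by omega, h2, h3, h4, ?_, ?_⟩
      · rw [PySem.List.pyRange_one_cons (by omega)]
        simp only [scanA]
        rw [if_neg hbreak, heqS]
      · rw [loopB, if_pos hj, dif_pos (by omega : t ≤ M), if_neg hbreak, hcnt']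
        exact heqL

-- difference form of a bars list: allocation entries B emits directly
def dconv (p : Int) : List Int → List Int
  | [] => []
  | t :: ts => (t - p - 1) :: dconv t ts

theorem dconv_length (p : Int) (ts : List Int) : (dconv p ts).length = ts.length := by
  induction ts generalizing p with
  | nil => rfl
  | cons t ts ih => simp [dconv, ih]

theorem dconv_getElem (p : Int) (ts : List Int) (m : Nat) (h : m < ts.length) :
    (dconv p ts)[m]'(by rw [dconv_length]; exact h)
      = ts[m] - (if hm : m = 0 then p else ts[m-1]'(by omega)) - 1 := by
  induction ts generalizing p m with
  | nil => simp at h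
  | cons t ts ih =>
    cases m with
    | zero => simp [dconv]
    | succ m =>
      simp only [dconv, List.getElem_cons_succ]
      rw [ih t m (by simpa using h)]
      cases m with
      | zero => simp
      | succ m => simp

-- the joint outer loop: A's fold over range(1, K) produces the bars list, and B's
-- single loop produces its difference form directly, with the same final prev
theorem loop_run (M K : Int) :
    ∀ n (i0 prev r cnt : Int) (bars alloc : List Int), (K - i0).toNat = n →
    1 ≤ i0 → i0 ≤ K → 0 ≤ r → r < pyComb (M - prev) (K - i0) →
    (0 ≤ K - 1 - i0 → cnt = pyComb (M - prev - 1) (K - 1 - i0)) →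
    ∃ (tail : List Int) (pfin rfin : Int),
      (PySem.List.pyRange i0 K 1).foldl (stepA M K) (bars, prev, r)
        = (bars ++ tail, pfin, rfin) ∧
      loopB M alloc r prev (prev + 1) (K - 1 - i0) cnt
        = (alloc ++ dconv prev tail, pfin) ∧
      tail.length = (K - i0).toNat ∧
      pfin = (prev :: tail).getLast (by simp) := by
  intro n
  induction n with
  | zero =>
    intro i0 prev r cnt bars alloc hn h1 h2 hr0 hr1 hcnt
    have hnil : PySem.List.pyRange i0 K 1 = [] := by
      rw [PySem.List.pyRange_one, hn]; simp
    refine ⟨[], prev, r, by simp [hnil], ?_, by simpa using hn.symm, by simp⟩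
    rw [loopB, if_neg (by omega : ¬ (0:Int) ≤ K - 1 - i0)]
    simp [dconv]
  | succ n ih =>
    intro i0 prev r cnt bars alloc hn h1 h2 hr0 hr1 hcnt
    have hlt : i0 < K := by omega
    have hj : 0 ≤ K - 1 - i0 := by omega
    have hjj : K - 1 - i0 + 1 = K - i0 := by ring
    have hpos : 0 < pyComb (M - prev) (K - i0) := by linarith
    have hle : K - i0 ≤ M - prev := by
      have := pyComb_pos_le hj (by rw [hjj]; exact hpos)
      omega
    have hM2 : M - (prev + 1) + 1 = M - prev := by ring
    obtain ⟨t, r', ht1, ht2, hr0', hr1', heqS, heqL⟩ :=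
      scan_loop M (K - 1 - i0) hj (M - (K - 1 - i0) - (prev + 1)).toNat (prev + 1) r cnt
        prev alloc rfl (by omega) hr0 (by rw [hM2, hjj]; exact hr1)
        (by rw [hcnt hj]; congr 1; ring)
    obtain ⟨tail, pfin, rfin, hA, hB, hlen, hpf⟩ :=
      ih (i0 + 1) t r'
        (if 1 ≤ K - 1 - i0 then
          PySem.Int.floordiv (pyComb (M - t) (K - 1 - i0) * (K - 1 - i0)) (M - t)
         else pyComb (M - t) (K - 1 - i0))
        (bars ++ [t]) (alloc ++ [t - prev - 1]) (by omega) (by omega) (by omega) hr0'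
        (by
          have he : K - (i0 + 1) = K - 1 - i0 := by ring
          rw [he]; exact hr1')
        (by
          intro hj1
          have he : K - 1 - (i0 + 1) = K - 1 - i0 - 1 := by ring
          rw [he, if_pos (by omega : (1:Int) ≤ K - 1 - i0),
            pyComb_ratio_break (by omega) (by omega)])
    rw [PySem.List.pyRange_one_cons hlt]
    refine ⟨t :: tail, pfin, rfin, ?_, ?_, by simp; omega, ?_⟩
    · simp only [List.foldl_cons]
      have hstep : stepA M K (bars, prev, r) i0 = (bars ++ [t], t, r') := by
        simp only [stepA]
        rw [heqS]
      rw [hstep, hA]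
      simp
    · rw [heqL]
      have harg : K - 1 - i0 - 1 = K - 1 - (i0 + 1) := by ring
      rw [harg, hB]
      simp [dconv]
    · rw [List.getLast_cons (by simp : (t :: tail) ≠ [])]
      exact hpf

theorem conv_fold (K : Int) (bars : List Int) (hK : 2 ≤ K) :
    ∀ (d : Nat), 1 + (d : Int) ≤ K - 1 →
    (((PySem.List.pyRange 1 (1 + (d : Int)) 1).foldl
        (fun x i => PySem.List.pySetD x i
          (PySem.List.pyGetD bars i 0 - PySem.List.pyGetD bars (i - 1) 0 - 1))
        (PySem.List.pySetD (PySem.List.pyRepeat [(0 : Int)] K) 0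
          (PySem.List.pyGetD bars 0 0 - 1))).length = K.toNat) ∧
    (∀ (m : Nat), m < K.toNat →
      ((PySem.List.pyRange 1 (1 + (d : Int)) 1).foldl
        (fun x i => PySem.List.pySetD x i
          (PySem.List.pyGetD bars i 0 - PySem.List.pyGetD bars (i - 1) 0 - 1))
        (PySem.List.pySetD (PySem.List.pyRepeat [(0 : Int)] K) 0
          (PySem.List.pyGetD bars 0 0 - 1))).getD m 0
        = if m = 0 then PySem.List.pyGetD bars 0 0 - 1
          else if (m : Int) < 1 + (d : Int) then
            PySem.List.pyGetD bars (m : Int) 0 - PySem.List.pyGetD bars ((m : Int) - 1) 0 - 1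
          else 0) := by
  intro d
  induction d with
  | zero =>
    intro hd
    have hrange : PySem.List.pyRange 1 (1 + ((0 : Nat) : Int)) 1 = [] := by
      rw [PySem.List.pyRange_one]; simp
    rw [hrange]
    simp only [List.foldl_nil]
    rw [PySem.List.pySetD_of_nonneg _ _ (by norm_num), PySem.List.pyRepeat_singleton]
    constructor
    · simp
    · intro m hm
      rw [List.getD_eq_getElem _ _ (by simpa using hm), List.getElem_set]
      by_cases h0 : m = 0
      · simp [h0]
      · simp only [if_neg (by omega : ¬ (0:Int).toNat = m), if_neg h0,
          List.getElem_replicate]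
        have : ¬ ((m : Int) < 1 + ((0 : Nat) : Int)) := by push_cast; omega
        rw [if_neg this]
  | succ d ih =>
    intro hd
    have hcast : (1 : Int) + ((d + 1 : Nat) : Int) = (1 + (d : Int)) + 1 := by
      push_cast; ring
    have hstep : PySem.List.pyRange 1 (1 + ((d + 1 : Nat) : Int)) 1
        = PySem.List.pyRange 1 (1 + (d : Int)) 1 ++ [1 + (d : Int)] := by
      rw [hcast, PySem.List.pyRange_one_succ_right (by omega)]
    obtain ⟨ihlen, ihget⟩ := ih (by push_cast at hd ⊢; omega)
    rw [hstep, List.foldl_append]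
    simp only [List.foldl_cons, List.foldl_nil]
    rw [PySem.List.pySetD_of_nonneg _ _ (by omega : (0:Int) ≤ 1 + (d : Int))]
    constructor
    · simpa using ihlen
    · intro m hm
      rw [List.getD_eq_getElem _ _ (by rw [List.length_set, ihlen]; exact hm), List.getElem_set]
      by_cases hc : (1 + (d : Int)).toNat = m
      · have hm0 : m ≠ 0 := by omega
        have hmc : (m : Int) = 1 + (d : Int) := by omega
        rw [if_pos hc, if_neg hm0, if_pos (by push_cast; omega : (m : Int) < 1 + ((d+1 : Nat) : Int)), hmc]
      · rw [if_neg hc, ← List.getD_eq_getElem _ 0 (by rw [ihlen]; exact hm),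
          ihget m hm]
        by_cases h0 : m = 0
        · simp [h0]
        · rw [if_neg h0, if_neg h0]
          by_cases hlt : (m : Int) < 1 + (d : Int)
          · rw [if_pos hlt, if_pos (by push_cast; omega)]
          · rw [if_neg hlt, if_neg (by push_cast; omega)]

theorem conv_eq (M K : Int) (bars : List Int) (hK : 2 ≤ K) (hL : bars.length = (K - 1).toNat) :
    PySem.List.pySetD
      ((PySem.List.pyRange 1 (K - 1) 1).foldl
        (fun x i => PySem.List.pySetD x i
          (PySem.List.pyGetD bars i 0 - PySem.List.pyGetD bars (i - 1) 0 - 1))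
        (PySem.List.pySetD (PySem.List.pyRepeat [(0 : Int)] K) 0 (PySem.List.pyGetD bars 0 0 - 1)))
      (K - 1) (M - PySem.List.pyGetD bars (-1) 0)
    = dconv 0 bars ++ [M - PySem.List.pyGetD bars (-1) 0] := by
  have hd : (1 : Int) + ((K - 2).toNat : Int) = K - 1 := by omega
  obtain ⟨hlen, hget⟩ := conv_fold K bars hK (K - 2).toNat (by omega)
  rw [hd] at hlen hget
  rw [PySem.List.pySetD_of_nonneg _ _ (by omega : (0:Int) ≤ K - 1)]
  apply List.ext_getElem
  · rw [List.length_set, hlen, List.length_append, dconv_length, hL]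
    simp; omega
  · intro m h1 h2
    rw [List.length_set, hlen] at h1
    rw [List.length_append, dconv_length, hL] at h2
    rw [List.getElem_set]
    by_cases hc : (K - 1).toNat = m
    · rw [if_pos hc]
      have hml : m = (dconv 0 bars).length := by rw [dconv_length, hL]; omega
      subst hml
      simp
    · rw [if_neg hc]
      have hm : m < K.toNat := h1
      have hmb : m < bars.length := by rw [hL]; simp at h2; omega
      rw [← List.getD_eq_getElem _ 0 (by rw [hlen]; exact hm), hget m hm,
        List.getElem_append_left (by rw [dconv_length]; exact hmb),
        dconv_getElem 0 bars m hmb]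
      by_cases h0 : m = 0
      · subst h0
        simp only [PySem.List.pyGetD_zero]
        rw [List.getD_eq_getElem _ _ hmb]
        simp
      · rw [if_neg h0, if_pos (by omega : (m : Int) < K - 1), dif_neg h0]
        have e1 : PySem.List.pyGetD bars (m : Int) 0 = bars[m] := by
          rw [PySem.List.pyGetD_natCast, List.getD_eq_getElem _ _ hmb]
        have e2 : PySem.List.pyGetD bars ((m : Int) - 1) 0 = bars[m - 1]'(by omega) := by
          have : (m : Int) - 1 = ((m - 1 : Nat) : Int) := by omega
          rw [this, PySem.List.pyGetD_natCast, List.getD_eq_getElem _ _ (by omega)]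
        rw [e1, e2]
-- ===== VERDICT (by name: the statement is the Claim_ definition above) =====
theorem index_to_allocation_spec : Claim_equal_index_to_allocation := by
  intro index N K hDom hPre
  obtain ⟨hK, hN, hi0, hi1⟩ := hPre
  unfold Spec_index_to_allocation
  have hinv : index < pyComb (N + K - 1 - 0) (K - 1) := by
    unfold pyComb
    rw [if_pos (by omega)]
    have he : N + K - 1 - 0 = N + K - 1 := by ring
    rw [he]
    exact hi1
  have hcnt0 : (0 : Int) ≤ K - 1 - 1 →
      (if 2 ≤ K then pyComb (N + K - 1 - 1) (K - 2) else 0)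
        = pyComb (N + K - 1 - 0 - 1) (K - 1 - 1) := by
    intro _
    rw [if_pos hK]
    congr 1 <;> ring
  obtain ⟨tail, pfin, rfin, hA, hB, hlen, hpf⟩ :=
    loop_run (N + K - 1) K (K - 1).toNat 1 0 index
      (if 2 ≤ K then pyComb (N + K - 1 - 1) (K - 2) else 0) [] []
      (by omega) (by omega) (by omega) hi0 hinv hcnt0
  have htne : tail ≠ [] := by
    intro h
    rw [h] at hlen
    simp at hlen
    omega
  have hpf' : pfin = PySem.List.pyGetD tail (-1) 0 := by
    rw [hpf, List.getLast_cons htne, PySem.List.pyGetD_neg_one tail 0 htne]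
  have harg1 : (0 : Int) + 1 = 1 := by ring
  have harg2 : K - 1 - 1 = K - 2 := by ring
  rw [harg1, harg2] at hB
  simp only [index_to_allocation, index_to_allocation_alt, hA, hB]
  simp only [List.nil_append]
  rw [conv_eq (N + K - 1) K tail hK hlen, hpf']
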